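-- pv_equiv track=rewrite | github.com/IgnasVanagas/Training_Plans | backend/app/services/season_planner.py | _group_contiguous
-- ===== SOURCE A (Python) =====
-- from typing import Any, Iterable
--
-- def _group_contiguous(rows: list[dict[str, Any]], key_name: str) -> list[list[dict[str, Any]]]:
--     groups: list[list[dict[str, Any]]] = []
--     current: list[dict[str, Any]] = []
--     last_value: Any = object()
--     for row in rows:
--         value = row.get(key_name)
--         if current and value != last_value:
--             groups.append(current)
--             current = []
--         current.append(row)
--         last_value = value
--     if current:
--         groups.append(current)
--     return groups
-- ===== SOURCE B (Python) =====
-- def _group_contiguous(rows, key_name):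
--     groups = []
--     i, n = 0, len(rows)
--     while i < n:
--         k = rows[i].get(key_name)
--         j = i + 1
--         while j < n and rows[j].get(key_name) == k:
--             j += 1
--         groups.append(rows[i:j])
--         i = j
--     return groups
-- ===== Notes on version B (the rewrite author's own statement) =====
-- stated objective: alternative
-- what changed: Replaced the accumulator-with-sentinel state machine (current buffer, last_value sentinel object) by a two-pointer span scan: the outer loop finds the end j of each run of equal key values with an inner scan and emits the whole group as one slice rows[i:j].
import Mathlib
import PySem

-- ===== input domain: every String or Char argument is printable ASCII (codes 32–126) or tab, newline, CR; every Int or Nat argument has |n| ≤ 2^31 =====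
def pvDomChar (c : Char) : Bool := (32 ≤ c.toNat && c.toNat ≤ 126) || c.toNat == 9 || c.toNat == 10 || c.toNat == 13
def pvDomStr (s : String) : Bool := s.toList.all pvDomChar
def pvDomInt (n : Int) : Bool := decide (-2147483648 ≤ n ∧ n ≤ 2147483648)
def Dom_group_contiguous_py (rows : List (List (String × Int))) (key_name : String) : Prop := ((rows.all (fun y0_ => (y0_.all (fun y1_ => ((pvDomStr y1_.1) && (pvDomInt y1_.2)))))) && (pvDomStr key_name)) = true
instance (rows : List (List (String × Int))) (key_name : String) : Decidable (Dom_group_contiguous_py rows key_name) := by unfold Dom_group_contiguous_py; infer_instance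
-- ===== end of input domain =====

-- B replaces A's accumulator-with-sentinel state machine by a two-pointer span scan that
-- emits each maximal run of equal key values as one slice (objective: alternative).

-- row.get(key_name) : dict lookup returning None (= none) when the key is absent
def pvGet (row : List (String × Int)) (key_name : String) : Option Int :=
  (PySem.Dict.mk row).get? key_name

-- ===== PORT A =====
-- A's for-loop: state (groups, current, last_value); the fresh sentinel object() is
-- modelled by `none : Option (Option Int)` — `some value ≠ none` always holds, exactly as
-- `value != object()` does, and once `current` is nonempty the sentinel is gone.
def pvALoop (key_name : String) (rows : List (List (String × Int)))
    (groups : List (List (List (String × Int)))) (current : List (List (String × Int)))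
    (last : Option (Option Int)) :
    List (List (List (String × Int))) :=
  match rows with
  | [] => if current ≠ [] then groups ++ [current] else groups
  | r :: rest =>
      let value := pvGet r key_name
      if current ≠ [] ∧ some value ≠ last then
        pvALoop key_name rest (groups ++ [current]) [r] (some value)
      else
        pvALoop key_name rest groups (current ++ [r]) (some value)

def group_contiguous_py (rows : List (List (String × Int))) (key_name : String) : List (List (List (String × Int))) :=
  pvALoop key_name rows [] [] none

-- ===== PORT B =====
-- inner while loop of B: advance j while j < n and rows[j].get(key_name) == k.
-- rows.getD j [] is rows[j]; the loop only reads it under j < n = rows.length, so the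
-- default is never used.
def pvRunEnd (key_name : String) (rows : List (List (String × Int))) (n : Nat)
    (k : Option Int) (j : Nat) : Nat :=
  if h : j < n ∧ pvGet (rows.getD j []) key_name = k then
    pvRunEnd key_name rows n k (j + 1)
  else j
termination_by n - j
decreasing_by omega

-- needed by pvBLoop's termination: j never moves left
theorem pvRunEnd_ge (key_name : String) (rows : List (List (String × Int))) (n : Nat)
    (k : Option Int) (j : Nat) : j ≤ pvRunEnd key_name rows n k j := by
  fun_induction pvRunEnd <;> omega

-- outer while loop of B over the index i
def pvBLoop (key_name : String) (rows : List (List (String × Int))) (n : Nat)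
    (groups : List (List (List (String × Int)))) (i : Nat) :
    List (List (List (String × Int))) :=
  if _h : i < n then
    let k := pvGet (rows.getD i []) key_name
    let j := pvRunEnd key_name rows n k (i + 1)
    pvBLoop key_name rows n (groups ++ [PySem.List.slice rows (some (i : Int)) (some (j : Int))]) j
  else groups
termination_by n - i
decreasing_by
  have := pvRunEnd_ge key_name rows n (pvGet (rows.getD i []) key_name) (i + 1)
  omega

def group_contiguous_py_alt (rows : List (List (String × Int))) (key_name : String) : List (List (List (String × Int))) :=
  pvBLoop key_name rows rows.length [] 0

-- ===== PRECONDITION & SPEC =====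
def Spec_group_contiguous_py (rows : List (List (String × Int))) (key_name : String) (out : List (List (List (String × Int)))) : Prop := out = group_contiguous_py_alt rows key_name
instance (rows : List (List (String × Int))) (key_name : String) (out : List (List (List (String × Int)))) : Decidable (Spec_group_contiguous_py rows key_name out) := by unfold Spec_group_contiguous_py; infer_instance

-- ===== CLAIM (what is proved, stated in full; the proofs are below) =====
def Claim_equal_group_contiguous_py : Prop := ∀ (rows : List (List (String × Int))) (key_name : String), Dom_group_contiguous_py rows key_name → Spec_group_contiguous_py rows key_name (group_contiguous_py rows key_name)

-- ===== LEMMAS AND PROOFS =====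

-- canonical span recursion both ports are reduced to
def pvSpan (key_name : String) : List (List (String × Int)) → List (List (List (String × Int)))
  | [] => []
  | r :: t =>
      (r :: t.takeWhile (fun x => pvGet x key_name == pvGet r key_name)) ::
        pvSpan key_name (t.dropWhile (fun x => pvGet x key_name == pvGet r key_name))
termination_by l => l.length
decreasing_by
  have := List.length_dropWhile_le (fun x => pvGet x key_name == pvGet r key_name) t
  simp; omega

theorem take_len_takeWhile {α : Type} (p : α → Bool) (t : List α) :
    t.take (t.takeWhile p).length = t.takeWhile p := by
  induction t with
  | nil => rfl
  | cons a t ih => by_cases h : p a <;> simp [h, ih]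

theorem drop_len_takeWhile {α : Type} (p : α → Bool) (t : List α) :
    t.drop (t.takeWhile p).length = t.dropWhile p := by
  induction t with
  | nil => rfl
  | cons a t ih => by_cases h : p a <;> simp [h, ih]

-- A's loop only ever appends to `groups`
theorem pvALoop_append (key_name : String) (rows : List (List (String × Int)))
    (g1 g2 : List (List (List (String × Int)))) (current : List (List (String × Int)))
    (last : Option (Option Int)) :
    pvALoop key_name rows (g1 ++ g2) current last = g1 ++ pvALoop key_name rows g2 current last := by
  induction rows generalizing g2 current last with
  | nil => simp only [pvALoop]; split <;> simp
  | cons r rest ih =>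
      simp only [pvALoop]
      split
      · rw [List.append_assoc]; exact ih (g2 ++ _) _ _
      · exact ih _ _ _

theorem pvALoop_extract (key_name : String) (rows : List (List (String × Int)))
    (g : List (List (List (String × Int)))) (current : List (List (String × Int)))
    (last : Option (Option Int)) :
    pvALoop key_name rows g current last = g ++ pvALoop key_name rows [] current last := by
  simpa using pvALoop_append key_name rows g [] current last

-- characterisation of A's loop in steady state (current nonempty, sentinel gone)
theorem pvALoop_steady (key_name : String) (rest : List (List (String × Int)))
    (c : List (List (String × Int))) (v : Option Int) (hc : c ≠ []) :
    pvALoop key_name rest [] c (some v)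
      = (c ++ rest.takeWhile (fun x => pvGet x key_name == v)) ::
          pvSpan key_name (rest.dropWhile (fun x => pvGet x key_name == v)) := by
  induction rest generalizing c v with
  | nil => simp [pvALoop, hc, pvSpan]
  | cons r t ih =>
      by_cases hv : pvGet r key_name = v
      · have hcond : ¬ (c ≠ [] ∧ some (pvGet r key_name) ≠ some v) := by simp [hv]
        simp only [pvALoop]
        rw [if_neg hcond, hv, ih (c ++ [r]) v (by simp)]
        simp [hv]
      · have hcond : (c ≠ [] ∧ some (pvGet r key_name) ≠ some v) := ⟨hc, by simp [hv]⟩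
        simp only [pvALoop]
        rw [if_pos hcond, pvALoop_extract, ih [r] (pvGet r key_name) (by simp)]
        have hb : (pvGet r key_name == v) = false := by simp [hv]
        simp [hb, pvSpan]

theorem pvA_eq_span (rows : List (List (String × Int))) (key_name : String) :
    group_contiguous_py rows key_name = pvSpan key_name rows := by
  cases rows with
  | nil => simp [group_contiguous_py, pvALoop, pvSpan]
  | cons r t =>
      unfold group_contiguous_py
      rw [show pvALoop key_name (r :: t) [] [] none
            = pvALoop key_name t [] [r] (some (pvGet r key_name)) by simp [pvALoop]]
      rw [pvALoop_steady key_name t [r] (pvGet r key_name) (by simp)]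
      simp [pvSpan]

theorem pvRunEnd_spec (key_name : String) (rows : List (List (String × Int)))
    (k : Option Int) (j : Nat) :
    pvRunEnd key_name rows rows.length k j
      = j + ((rows.drop j).takeWhile (fun x => pvGet x key_name == k)).length := by
  fun_induction pvRunEnd key_name rows rows.length k j with
  | case1 j h ih =>
      obtain ⟨hlt, hk⟩ := h
      rw [ih]
      have hd : rows.drop j = rows[j] :: rows.drop (j + 1) :=
        List.drop_eq_getElem_cons hlt
      have hg : rows.getD j [] = rows[j] := List.getD_eq_getElem rows [] hlt
      have hv : pvGet rows[j] key_name = k := hg ▸ hk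
      rw [hd, List.takeWhile_cons, if_pos (by simp [hv])]
      simp only [List.length_cons]
      omega
  | case2 j h =>
      by_cases hlt : j < rows.length
      · have hk : ¬ pvGet (rows.getD j []) key_name = k := by tauto
        have hd : rows.drop j = rows[j] :: rows.drop (j + 1) :=
          List.drop_eq_getElem_cons hlt
        have hg : rows.getD j [] = rows[j] := List.getD_eq_getElem rows [] hlt
        have hv : ¬ pvGet rows[j] key_name = k := hg ▸ hk
        rw [hd, List.takeWhile_cons, if_neg (by simp [hv])]
        simp
      · have : rows.drop j = [] := List.drop_eq_nil_of_le (by omega)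
        simp [this]

theorem pvBLoop_eq (key_name : String) (rows : List (List (String × Int)))
    (g : List (List (List (String × Int)))) (i : Nat) :
    pvBLoop key_name rows rows.length g i = g ++ pvSpan key_name (rows.drop i) := by
  fun_induction pvBLoop key_name rows rows.length g i with
  | case1 g i h k j ih =>
      rw [ih]
      have hd : rows.drop i = rows[i] :: rows.drop (i + 1) :=
        List.drop_eq_getElem_cons h
      have hg : rows.getD i [] = rows[i] := List.getD_eq_getElem rows [] h
      have hj : j = (i + 1) + ((rows.drop (i + 1)).takeWhile (fun x => pvGet x key_name == k)).length :=
        pvRunEnd_spec key_name rows k (i + 1)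
      have hslice : PySem.List.slice rows (some (i : Int)) (some (j : Int))
          = rows[i] :: (rows.drop (i + 1)).takeWhile (fun x => pvGet x key_name == k) := by
        rw [PySem.List.slice_natCast, hd, hj,
          show (i + 1) + ((rows.drop (i + 1)).takeWhile (fun x => pvGet x key_name == k)).length - i
              = ((rows.drop (i + 1)).takeWhile (fun x => pvGet x key_name == k)).length + 1 by omega]
        rw [List.take_succ_cons, take_len_takeWhile]
      have hdropj : rows.drop j
          = (rows.drop (i + 1)).dropWhile (fun x => pvGet x key_name == k) := by
        rw [hj, ← drop_len_takeWhile (fun x => pvGet x key_name == k) (rows.drop (i + 1)),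
          List.drop_drop, Nat.add_comm]
      have hk : pvGet rows[i] key_name = k := by rw [← hg]
      rw [hslice, hdropj, hd, pvSpan, hk]
      simp
  | case2 g i h =>
      have : rows.drop i = [] := List.drop_eq_nil_of_le (by omega)
      simp [this, pvSpan]

-- ===== VERDICT (by name: the statement is the Claim_ definition above) =====
theorem group_contiguous_py_spec : Claim_equal_group_contiguous_py := by
  intro rows key_name _
  unfold Spec_group_contiguous_py group_contiguous_py_alt
  rw [pvA_eq_span, pvBLoop_eq]
  simp
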